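-- pv_equiv track=rewrite | github.com/pypi-data/pypi-mirror-2 | packages/dropstar/dropstar-2010.10.14.0-py2.6.egg/dropstar/process.py | GetSiteConf
-- ===== SOURCE A (Python) =====
-- def GetSiteConf(sites, host):
--   """Get the site specified by the host in the conf."""
--   #print 'GetSite: Sites: %s' % sites
--
--   default = None
--
--   for (site, site_conf) in sites:
--     if host == site:
--       return site_conf
--     elif default == None:
--       default = site_conf
--
--     #TODO(g): Match with regexs, and also use the 'aliases' list to match more
--     #   host headers
--     pass
--
--   return default
-- ===== SOURCE B (Python) =====
-- def GetSiteConf(sites, host):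
--   """Get the site specified by the host in the conf."""
--   default = sites[0][1] if sites else None
--   d = {}
--   for (site, site_conf) in sites:
--     d.setdefault(site, site_conf)
--   return d.get(host, default)
-- ===== Notes on version B (the rewrite author's own statement) =====
-- stated objective: idiomatic
-- what changed: Replaces the interleaved scan with early return and a mutable default by building a first-wins dict index (setdefault) plus a precomputed default, then a single keyed lookup d.get(host, default).
import Mathlib
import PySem

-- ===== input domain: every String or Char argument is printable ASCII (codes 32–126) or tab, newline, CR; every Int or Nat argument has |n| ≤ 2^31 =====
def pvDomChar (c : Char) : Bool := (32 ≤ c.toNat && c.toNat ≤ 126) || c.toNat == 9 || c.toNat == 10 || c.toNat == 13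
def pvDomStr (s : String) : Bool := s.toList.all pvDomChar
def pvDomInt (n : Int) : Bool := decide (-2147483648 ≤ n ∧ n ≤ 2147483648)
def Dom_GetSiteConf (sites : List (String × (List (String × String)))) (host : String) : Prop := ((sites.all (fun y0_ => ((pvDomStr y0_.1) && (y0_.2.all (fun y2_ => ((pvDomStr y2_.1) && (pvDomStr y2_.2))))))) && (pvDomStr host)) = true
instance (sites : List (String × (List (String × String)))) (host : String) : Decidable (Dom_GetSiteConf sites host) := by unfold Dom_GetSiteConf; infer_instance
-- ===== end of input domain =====

-- B replaces A's interleaved scan-with-early-return by a first-wins dict index plus one keyed lookup (idiomatic restructuring, same cost).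


-- ===== PORT A =====
-- the for-loop of A: carries the mutable `default`; early return on host == site
def GetSiteConfLoop (host : String) (sites : List (String × (List (String × String)))) (default : Option (List (String × String))) : Option (List (String × String)) :=
  match sites with
  | [] => default
  | (site, site_conf) :: rest =>
    if host == site then some site_conf
    else if default = none then GetSiteConfLoop host rest (some site_conf)
    else GetSiteConfLoop host rest default

def GetSiteConf (sites : List (String × (List (String × String)))) (host : String) : Option (List (String × String)) :=
  GetSiteConfLoop host sites none

-- ===== PORT B =====
def GetSiteConf_alt (sites : List (String × (List (String × String)))) (host : String) : Option (List (String × String)) :=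
  let default : Option (List (String × String)) :=
    match sites with
    | [] => none
    | p :: _ => some p.2
  let d := sites.foldl (fun d p => d.setdefault p.1 p.2) (PySem.Dict.empty : PySem.Dict String (List (String × String)))
  match d.get? host with
  | some v => some v
  | none => default

-- ===== PRECONDITION & SPEC =====
def Spec_GetSiteConf (sites : List (String × (List (String × String)))) (host : String) (out : Option (List (String × String))) : Prop := out = GetSiteConf_alt sites host
instance (sites : List (String × (List (String × String)))) (host : String) (out : Option (List (String × String))) : Decidable (Spec_GetSiteConf sites host out) := by unfold Spec_GetSiteConf; infer_instance

-- ===== CLAIM (what is proved, stated in full; the proofs are below) =====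
def Claim_equal_GetSiteConf : Prop := ∀ (sites : List (String × (List (String × String)))) (host : String), Dom_GetSiteConf sites host → Spec_GetSiteConf sites host (GetSiteConf sites host)

-- ===== LEMMAS AND PROOFS =====

-- first matching conf in the list (the common value both programs are organised around)
def firstConf (sites : List (String × (List (String × String)))) (host : String) : Option (List (String × String)) :=
  (sites.find? (fun p => host == p.1)).map Prod.snd

theorem setdefault_eq_insert {κ ν : Type} [BEq κ] [LawfulBEq κ] (d : PySem.Dict κ ν) (k : κ) (v : ν) :
    d.setdefault k v = if d.contains k then d else d.insert k v := by
  by_cases h : d.contains k = true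
  · simp [PySem.Dict.setdefault, h]
  · have h' : d.contains k = false := by simpa using h
    simp only [PySem.Dict.setdefault, h', Bool.false_eq_true, if_false]
    apply PySem.Dict.ext
    rw [PySem.Dict.items_insert_of_not_contains _ _ h']

theorem get?_setdefault {κ ν : Type} [BEq κ] [LawfulBEq κ] [DecidableEq κ] (d : PySem.Dict κ ν) (k k' : κ) (v : ν) :
    (d.setdefault k v).get? k' = if k' = k then some ((d.get? k).getD v) else d.get? k' := by
  rw [setdefault_eq_insert]
  by_cases hc : d.contains k = true
  · rw [if_pos hc]
    have hs : (d.get? k).isSome := by rw [← PySem.Dict.contains_eq_isSome_get?]; exact hc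
    by_cases hk : k' = k
    · subst hk
      cases hg : d.get? k' <;> simp_all
    · simp [hk]
  · rw [if_neg hc, PySem.Dict.get?_insert]
    have hn : d.get? k = none := by
      cases hg : d.get? k with
      | none => rfl
      | some w => exact absurd (by rw [PySem.Dict.contains_eq_isSome_get?, hg]; rfl) hc
    by_cases hk : k' = k <;> simp [hk, hn]

theorem get?_foldl_setdefault (l : List (String × (List (String × String)))) (d : PySem.Dict String (List (String × String))) (h : String) :
    (l.foldl (fun d p => d.setdefault p.1 p.2) d).get? h =
      match d.get? h with
      | some w => some w
      | none => firstConf l h := by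
  induction l generalizing d with
  | nil => cases hd : d.get? h <;> simp [firstConf, hd]
  | cons p rest ih =>
    simp only [List.foldl_cons, ih, get?_setdefault]
    by_cases hk : h = p.1
    · subst hk
      cases hd : d.get? p.1 <;> simp [firstConf]
    · simp [hk, firstConf]

theorem loopA_eq (l : List (String × (List (String × String)))) (host : String) (default : Option (List (String × String))) :
    GetSiteConfLoop host l default =
      match firstConf l host with
      | some c => some c
      | none =>
        match default with
        | some w => some w
        | none => l.head?.map Prod.snd := by
  induction l generalizing default with
  | nil => cases default <;> simp [GetSiteConfLoop, firstConf]
  | cons p rest ih =>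
    obtain ⟨site, conf⟩ := p
    by_cases hk : host = site
    · subst hk
      simp [GetSiteConfLoop, firstConf]
    · have hb : (host == site) = false := by simp [hk]
      cases default with
      | none =>
        simp only [GetSiteConfLoop, hb]
        simp only [ih]
        simp [firstConf, hk]
      | some w =>
        simp only [GetSiteConfLoop, hb]
        simp only [if_neg (by simp : ¬ (some w = none))]
        simp only [ih]
        simp [firstConf, hk]

theorem alt_eq (sites : List (String × (List (String × String)))) (host : String) :
    GetSiteConf_alt sites host =
      match (List.foldl (fun d p => d.setdefault p.1 p.2) PySem.Dict.empty sites).get? host with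
      | some v => some v
      | none => match sites with | [] => none | p :: _ => some p.2 := rfl

-- ===== VERDICT (by name: the statement is the Claim_ definition above) =====
theorem GetSiteConf_spec : Claim_equal_GetSiteConf := by
  intro sites host _
  unfold Spec_GetSiteConf GetSiteConf
  rw [loopA_eq]
  rw [alt_eq, get?_foldl_setdefault]
  simp only [PySem.Dict.get?_empty]
  cases hf : firstConf sites host <;> cases sites <;> simp_all [firstConf]
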